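-- pv_equiv track=rewrite | github.com/godknowspe/brain_block | brain_block.py | generate_placements
-- ===== SOURCE A (Python) =====
-- def normalize(coords):
--     """Translate shape to start at (0,0) and sort coordinates."""
--     if not coords:
--         return tuple()
--     min_x = min(x for x, y in coords)
--     min_y = min(y for x, y in coords)
--     shifted = [(x - min_x, y - min_y) for x, y in coords]
--     return tuple(sorted(shifted))
--
-- def translate(shape, dx=0, dy=0):
--     """Move shape by (dx, dy)."""
--     return tuple((x + dx, y + dy) for x, y in shape)
--
-- def rotate_90(coords):
--     """Rotate coordinates 90 degrees counterclockwise."""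
--     return [(-y, x) for x, y in coords]
--
-- def mirror_horizontal(coords):
--     """Mirror coordinates horizontally (flip left-right)."""
--     return [(-x, y) for x, y in coords]
--
-- def generate_orientations(coords):
--     """Generate all unique orientations (rotations + reflections)."""
--     orientations = set()
--
--     for flip in [False, True]:
--         shape = mirror_horizontal(coords) if flip else list(coords)
--         current = shape
--         for _ in range(4):
--             normalized = normalize(current)
--             orientations.add(normalized)
--             current = rotate_90(current)
--
--     return orientations
--
-- def generate_placements(coords, board_width, board_height, piece_index):
--     """Generate all valid placements of a piece on the board."""
--     placements = {}
--     orientations = generate_orientations(coords)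
--
--     for orientation in orientations:
--         max_x = max(x for x, y in orientation)
--         max_y = max(y for x, y in orientation)
--
--         for dx in range(board_width - max_x):
--             for dy in range(board_height - max_y):
--                 placement = translate(orientation, dx, dy)
--                 placements[placement] = piece_index
--
--     return placements
-- ===== SOURCE B (Python) =====
-- def normalize(coords):
--     """Translate shape to start at (0,0) and sort coordinates."""
--     if not coords:
--         return tuple()
--     min_x = min(x for x, y in coords)
--     min_y = min(y for x, y in coords)
--     shifted = [(x - min_x, y - min_y) for x, y in coords]
--     return tuple(sorted(shifted))
--
-- def translate(shape, dx=0, dy=0):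
--     """Move shape by (dx, dy)."""
--     return tuple((x + dx, y + dy) for x, y in shape)
--
-- def rotate_90(coords):
--     """Rotate coordinates 90 degrees counterclockwise."""
--     return [(-y, x) for x, y in coords]
--
-- def mirror_horizontal(coords):
--     """Mirror coordinates horizontally (flip left-right)."""
--     return [(-x, y) for x, y in coords]
--
-- def generate_orientations(coords):
--     """Generate all unique orientations (rotations + reflections)."""
--     orientations = set()
--     for flip in [False, True]:
--         shape = mirror_horizontal(coords) if flip else list(coords)
--         current = shape
--         for _ in range(4):
--             normalized = normalize(current)
--             orientations.add(normalized)
--             current = rotate_90(current)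
--     return orientations
--
-- def shift_right(shape):
--     return tuple((x + 1, y) for x, y in shape)
--
-- def shift_up(shape):
--     return tuple((x, y + 1) for x, y in shape)
--
-- def generate_placements(coords, board_width, board_height, piece_index):
--     """Generate all valid placements of a piece on the board by successor chaining:
--     no offsets are ever computed — each placement is obtained from its neighbour by
--     a unit shift.  Stage 1 slides the orientation right one cell at a time, while it
--     still fits, collecting the column seeds; stage 2 walks each seed upward one cell
--     at a time, while it still fits, recording every shape passed through."""
--     placements = {}
--     for orientation in generate_orientations(coords):
--         if not all(y < board_height for x, y in orientation):
--             continue  # too tall: sliding sideways can never make it fit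
--         columns = []
--         shape = orientation
--         while all(x < board_width for x, y in shape):
--             columns.append(shape)
--             shape = shift_right(shape)
--         for column in columns:
--             shape = column
--             while all(y < board_height for x, y in shape):
--                 placements[shape] = piece_index
--                 shape = shift_up(shape)
--     return placements
-- ===== Notes on version B (the rewrite author's own statement) =====
-- stated objective: alternative
-- what changed: A computes max_x/max_y per orientation and translates it by every offset pair from the exact nested ranges; B never computes maxima or offsets: after skipping orientations that cannot fit vertically, it builds each placement from its neighbour by a unit successor shift, in two staged passes - slide the orientation right one cell at a time while it fits to collect column seeds, then walk each seed upward one cell at a time while it fits, recording every shape passed through.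
import Mathlib
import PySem

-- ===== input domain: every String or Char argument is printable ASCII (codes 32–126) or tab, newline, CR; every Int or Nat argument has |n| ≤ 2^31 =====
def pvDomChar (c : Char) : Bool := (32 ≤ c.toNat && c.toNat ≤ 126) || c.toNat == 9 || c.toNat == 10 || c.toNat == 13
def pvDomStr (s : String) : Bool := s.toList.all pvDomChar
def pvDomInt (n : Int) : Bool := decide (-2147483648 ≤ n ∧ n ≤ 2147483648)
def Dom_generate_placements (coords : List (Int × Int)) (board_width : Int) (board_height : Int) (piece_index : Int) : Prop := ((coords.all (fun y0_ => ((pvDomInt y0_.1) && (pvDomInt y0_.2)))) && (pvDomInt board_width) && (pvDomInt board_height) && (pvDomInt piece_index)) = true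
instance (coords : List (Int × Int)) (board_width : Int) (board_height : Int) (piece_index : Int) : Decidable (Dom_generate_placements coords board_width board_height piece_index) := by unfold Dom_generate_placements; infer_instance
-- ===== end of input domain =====

-- B replaces A's offset arithmetic (translate by every pair from the exact nested
-- ranges computed via max_x/max_y) by staged successor chaining: slide the
-- orientation right one cell at a time while it fits, then walk each column seed
-- upward one cell at a time while it fits; same return value (objective: alternative).

-- ===== PORT A =====
-- shared module helpers (identical source in Source A and Source B)
def pyNormalize (coords : List (Int × Int)) : List (Int × Int) :=
  if coords = [] then []
  else
    -- coords is nonempty here, so min? is `some` and the `.getD 0` default is never used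
    let min_x := (PySem.List.min? (coords.map (fun p => p.1)) (fun x => x)).getD 0
    let min_y := (PySem.List.min? (coords.map (fun p => p.2)) (fun x => x)).getD 0
    let shifted := coords.map (fun p => (p.1 - min_x, p.2 - min_y))
    PySem.List.sorted2 shifted (fun p => p.1) (fun p => p.2) false

def pyTranslate (shape : List (Int × Int)) (dx : Int) (dy : Int) : List (Int × Int) :=
  shape.map (fun p => (p.1 + dx, p.2 + dy))

def pyRotate90 (coords : List (Int × Int)) : List (Int × Int) :=
  coords.map (fun p => (-p.2, p.1))

def pyMirrorH (coords : List (Int × Int)) : List (Int × Int) :=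
  coords.map (fun p => (-p.1, p.2))

def pyGenerateOrientations (coords : List (Int × Int)) : PySem.Set (List (Int × Int)) :=
  [false, true].foldl
    (fun orientations flip =>
      let shape := if flip then pyMirrorH coords else coords
      ((List.range 4).foldl
        (fun (st : PySem.Set (List (Int × Int)) × List (Int × Int)) _ =>
          (PySem.Set.add st.1 (pyNormalize st.2), pyRotate90 st.2))
        (orientations, shape)).1)
    PySem.Set.empty

def generate_placements (coords : List (Int × Int)) (board_width : Int) (board_height : Int) (piece_index : Int) : List (List (Int × Int) × Int) :=
  (((pyGenerateOrientations coords).foldl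
    (fun (placements : PySem.Dict (List (Int × Int)) Int) orientation =>
      match PySem.List.max? (orientation.map (fun p => p.1)) (fun x => x),
            PySem.List.max? (orientation.map (fun p => p.2)) (fun x => x) with
      | some max_x, some max_y =>
          (PySem.List.pyRange 0 (board_width - max_x) 1).foldl
            (fun pl dx =>
              (PySem.List.pyRange 0 (board_height - max_y) 1).foldl
                (fun pl dy => pl.insert (pyTranslate orientation dx dy) piece_index) pl)
            placements
      -- Python raises ValueError (max of an empty sequence) here; excluded by Pre_
      | _, _ => placements)
    PySem.Dict.empty)).items

-- ===== PORT B =====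
-- Source B's helpers: unit shifts
def pvShiftR (shape : List (Int × Int)) : List (Int × Int) :=
  shape.map (fun p => (p.1 + 1, p.2))

def pvShiftU (shape : List (Int × Int)) : List (Int × Int) :=
  shape.map (fun p => (p.1, p.2 + 1))

-- stage-1 while loop: slide right while every x < board_width, collecting column seeds.
-- fuel only makes the recursion total; within Pre_ (coords ≠ []) every orientation is
-- nonempty with nonnegative coordinates, so fuel = board_width.toNat never runs out.
def pvCols (bw : Int) : Nat → List (List (Int × Int)) → List (Int × Int) → List (List (Int × Int))
  | 0, cols, _ => cols
  | n + 1, cols, s =>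
    if s.all (fun p => decide (p.1 < bw)) then pvCols bw n (cols ++ [s]) (pvShiftR s)
    else cols

-- stage-2 while loop: walk a column seed upward while every y < board_height,
-- recording every shape passed through.  Same fuel remark (fuel = board_height.toNat).
def pvClimb (bh idx : Int) : Nat → PySem.Dict (List (Int × Int)) Int → List (Int × Int) → PySem.Dict (List (Int × Int)) Int
  | 0, pl, _ => pl
  | n + 1, pl, s =>
    if s.all (fun p => decide (p.2 < bh)) then pvClimb bh idx n (pl.insert s idx) (pvShiftU s)
    else pl

def generate_placements_alt (coords : List (Int × Int)) (board_width : Int) (board_height : Int) (piece_index : Int) : List (List (Int × Int) × Int) :=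
  (((pyGenerateOrientations coords).foldl
    (fun (placements : PySem.Dict (List (Int × Int)) Int) orientation =>
      if orientation.all (fun p => decide (p.2 < board_height)) then
      (pvCols board_width board_width.toNat [] orientation).foldl
        (fun pl column => pvClimb board_height piece_index board_height.toNat pl column)
        placements
      else placements)  -- too tall: sliding sideways can never make it fit
    PySem.Dict.empty)).items

-- ===== PRECONDITION & SPEC =====
-- Pre_ excludes only coords = [], on which Python A raises ValueError (max of an empty sequence).
def Pre_generate_placements (coords : List (Int × Int)) (board_width : Int) (board_height : Int) (piece_index : Int) : Prop := coords ≠ []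
instance (coords : List (Int × Int)) (board_width : Int) (board_height : Int) (piece_index : Int) : Decidable (Pre_generate_placements coords board_width board_height piece_index) := by unfold Pre_generate_placements; infer_instance

def pvWitness_generate_placements : (List (Int × Int)) × Int × Int × Int := ([(0, 0), (1, 0)], 3, 2, 1)

def Spec_generate_placements (coords : List (Int × Int)) (board_width : Int) (board_height : Int) (piece_index : Int) (out : List (List (Int × Int) × Int)) : Prop := out = generate_placements_alt coords board_width board_height piece_index
instance (coords : List (Int × Int)) (board_width : Int) (board_height : Int) (piece_index : Int) (out : List (List (Int × Int) × Int)) : Decidable (Spec_generate_placements coords board_width board_height piece_index out) := by unfold Spec_generate_placements; infer_instance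

-- ===== CLAIM (what is proved, stated in full; the proofs are below) =====
def Claim_equal_generate_placements : Prop := ∀ (coords : List (Int × Int)) (board_width : Int) (board_height : Int) (piece_index : Int), Dom_generate_placements coords board_width board_height piece_index → Pre_generate_placements coords board_width board_height piece_index → Spec_generate_placements coords board_width board_height piece_index (generate_placements coords board_width board_height piece_index)

-- ===== LEMMAS AND PROOFS =====

-- a "good" shape: nonempty with all coordinates nonnegative (true of every orientation)
def pvGood (o : List (Int × Int)) : Prop := o ≠ [] ∧ ∀ p ∈ o, 0 ≤ p.1 ∧ 0 ≤ p.2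

theorem pvGood_normalize (xs : List (Int × Int)) (h : xs ≠ []) : pvGood (pyNormalize xs) := by
  unfold pyNormalize
  rw [if_neg h]
  obtain ⟨mx, hmx⟩ : ∃ m, PySem.List.min? (xs.map (fun p => p.1)) (fun x => x) = some m := by
    cases hopt : PySem.List.min? (xs.map (fun p => p.1)) (fun x => x) with
    | none => exact absurd ((PySem.List.min?_eq_none_iff _ _).1 hopt) (by simpa using h)
    | some m => exact ⟨m, rfl⟩
  obtain ⟨my, hmy⟩ : ∃ m, PySem.List.min? (xs.map (fun p => p.2)) (fun x => x) = some m := by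
    cases hopt : PySem.List.min? (xs.map (fun p => p.2)) (fun x => x) with
    | none => exact absurd ((PySem.List.min?_eq_none_iff _ _).1 hopt) (by simpa using h)
    | some m => exact ⟨m, rfl⟩
  simp only [hmx, hmy, Option.getD_some]
  have hperm := PySem.List.sorted2_perm
    (xs := xs.map (fun p => (p.1 - mx, p.2 - my))) (k1 := fun p => p.1) (k2 := fun p => p.2) (rev := false)
  constructor
  · intro hnil
    rw [hnil] at hperm
    have := hperm.symm.eq_nil
    simp at this
    exact h (by simpa using this)
  · intro p hp
    have hp' := hperm.mem_iff.1 hp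
    simp only [List.mem_map] at hp'
    obtain ⟨q, hq, rfl⟩ := hp'
    have h1 := PySem.List.min?_isMin hmx q.1 (List.mem_map_of_mem hq)
    have h2 := PySem.List.min?_isMin hmy q.2 (List.mem_map_of_mem hq)
    simp at h1 h2 ⊢
    omega

theorem pvGood_orientations (coords : List (Int × Int)) (h : coords ≠ []) :
    ∀ o ∈ pyGenerateOrientations coords, pvGood o := by
  intro o ho
  unfold pyGenerateOrientations at ho
  simp only [List.range_succ, List.range_zero, List.nil_append, List.cons_append,
    List.foldl_cons, List.foldl_nil, PySem.Set.mem_add, if_true, if_false,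
    Bool.false_eq_true] at ho
  have hm : pyMirrorH coords ≠ [] := by simp [pyMirrorH, h]
  have hr : ∀ xs : List (Int × Int), xs ≠ [] → pyRotate90 xs ≠ [] := by
    intro xs hxs; simp [pyRotate90, hxs]
  have ho' : o = pyNormalize coords ∨ o = pyNormalize (pyRotate90 coords) ∨
      o = pyNormalize (pyRotate90 (pyRotate90 coords)) ∨
      o = pyNormalize (pyRotate90 (pyRotate90 (pyRotate90 coords))) ∨
      o = pyNormalize (pyMirrorH coords) ∨ o = pyNormalize (pyRotate90 (pyMirrorH coords)) ∨
      o = pyNormalize (pyRotate90 (pyRotate90 (pyMirrorH coords))) ∨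
      o = pyNormalize (pyRotate90 (pyRotate90 (pyRotate90 (pyMirrorH coords)))) := by
    simp [PySem.Set.empty] at ho; tauto
  rcases ho' with rfl | rfl | rfl | rfl | rfl | rfl | rfl | rfl
  all_goals first
    | exact pvGood_normalize _ h
    | exact pvGood_normalize _ hm
    | exact pvGood_normalize _ (hr _ h)
    | exact pvGood_normalize _ (hr _ hm)
    | exact pvGood_normalize _ (hr _ (hr _ h))
    | exact pvGood_normalize _ (hr _ (hr _ hm))
    | exact pvGood_normalize _ (hr _ (hr _ (hr _ h)))
    | exact pvGood_normalize _ (hr _ (hr _ (hr _ hm)))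

-- a unit shift of a translated shape is the next translated shape
theorem pvShiftR_translate (o : List (Int × Int)) (a : Int) :
    pvShiftR (pyTranslate o a 0) = pyTranslate o (a + 1) 0 := by
  simp only [pvShiftR, pyTranslate, List.map_map]
  apply List.map_congr_left
  intro p _
  simp
  ring

theorem pvShiftU_translate (o : List (Int × Int)) (dx a : Int) :
    pvShiftU (pyTranslate o dx a) = pyTranslate o dx (a + 1) := by
  simp only [pvShiftU, pyTranslate, List.map_map]
  apply List.map_congr_left
  intro p _
  simp
  ring

theorem pyTranslate_zero (o : List (Int × Int)) : pyTranslate o 0 0 = o := by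
  simp [pyTranslate]

-- stage 1 characterised: the column seeds are the translates of o by dx in [a, bw - mx)
theorem pvCols_eq (bw mx : Int) (o : List (Int × Int))
    (hfit : ∀ a : Int, ((pyTranslate o a 0).all fun p => decide (p.1 < bw)) = true ↔ a < bw - mx) :
    ∀ (fuel : Nat) (a : Int), (bw - mx - a).toNat ≤ fuel → ∀ (cols : List (List (Int × Int))),
      pvCols bw fuel cols (pyTranslate o a 0)
        = cols ++ (PySem.List.pyRange a (bw - mx) 1).map (fun dx => pyTranslate o dx 0) := by
  intro fuel
  induction fuel with
  | zero =>
    intro a hk cols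
    rw [PySem.List.pyRange_one_eq_nil (by omega), List.map_nil, List.append_nil]
    rfl
  | succ n ih =>
    intro a hk cols
    by_cases ha : a < bw - mx
    · rw [pvCols, if_pos ((hfit a).2 ha), pvShiftR_translate,
        ih (a + 1) (by omega) (cols ++ [pyTranslate o a 0]),
        PySem.List.pyRange_one_cons ha]
      simp
    · rw [pvCols, if_neg (fun hc => ha ((hfit a).1 hc)),
        PySem.List.pyRange_one_eq_nil (by omega), List.map_nil, List.append_nil]

-- stage 2 characterised: climbing from the dx-column seed inserts the translates
-- of o by (dx, dy) for dy in [a, bh - my), in ascending order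
theorem pvClimb_eq (bh idx my dx : Int) (o : List (Int × Int))
    (hfit : ∀ a : Int, ((pyTranslate o dx a).all fun p => decide (p.2 < bh)) = true ↔ a < bh - my) :
    ∀ (fuel : Nat) (a : Int), (bh - my - a).toNat ≤ fuel →
      ∀ (pl : PySem.Dict (List (Int × Int)) Int),
      pvClimb bh idx fuel pl (pyTranslate o dx a)
        = (PySem.List.pyRange a (bh - my) 1).foldl
            (fun pl dy => pl.insert (pyTranslate o dx dy) idx) pl := by
  intro fuel
  induction fuel with
  | zero =>
    intro a hk pl
    rw [PySem.List.pyRange_one_eq_nil (by omega), List.foldl_nil]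
    rfl
  | succ n ih =>
    intro a hk pl
    by_cases ha : a < bh - my
    · rw [pvClimb, if_pos ((hfit a).2 ha), pvShiftU_translate,
        ih (a + 1) (by omega) (pl.insert (pyTranslate o dx a) idx),
        PySem.List.pyRange_one_cons ha, List.foldl_cons]
    · rw [pvClimb, if_neg (fun hc => ha ((hfit a).1 hc)),
        PySem.List.pyRange_one_eq_nil (by omega), List.foldl_nil]

-- ===== VERDICT (by name: the statement is the Claim_ definition above) =====
theorem generate_placements_spec : Claim_equal_generate_placements := by
  intro coords bw bh idx _ hpre
  unfold Spec_generate_placements generate_placements generate_placements_alt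
  congr 1
  apply PySem.List.foldl_congr_mem
  intro pl o ho
  obtain ⟨hne, hnn⟩ := pvGood_orientations coords hpre o ho
  obtain ⟨mx, hmx⟩ : ∃ m, PySem.List.max? (o.map (fun p => p.1)) (fun x => x) = some m := by
    cases hopt : PySem.List.max? (o.map (fun p => p.1)) (fun x => x) with
    | none => exact absurd ((PySem.List.max?_eq_none_iff _ _).1 hopt) (by simpa using hne)
    | some m => exact ⟨m, rfl⟩
  obtain ⟨my, hmy⟩ : ∃ m, PySem.List.max? (o.map (fun p => p.2)) (fun x => x) = some m := by
    cases hopt : PySem.List.max? (o.map (fun p => p.2)) (fun x => x) with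
    | none => exact absurd ((PySem.List.max?_eq_none_iff _ _).1 hopt) (by simpa using hne)
    | some m => exact ⟨m, rfl⟩
  simp only [hmx, hmy]
  obtain ⟨qx, hqx, hqx1⟩ : ∃ q ∈ o, q.1 = mx := by
    have := PySem.List.max?_mem hmx; simpa using this
  obtain ⟨qy, hqy, hqy2⟩ : ∃ q ∈ o, q.2 = my := by
    have := PySem.List.max?_mem hmy; simpa using this
  have hmaxx : ∀ p ∈ o, p.1 ≤ mx := by
    intro p hp
    have := PySem.List.max?_isMax hmx p.1 (List.mem_map_of_mem hp); simpa using this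
  have hmaxy : ∀ p ∈ o, p.2 ≤ my := by
    intro p hp
    have := PySem.List.max?_isMax hmy p.2 (List.mem_map_of_mem hp); simpa using this
  have hmx0 : 0 ≤ mx := hqx1 ▸ (hnn qx hqx).1
  have hmy0 : 0 ≤ my := hqy2 ▸ (hnn qy hqy).2
  have hfitx : ∀ a : Int, ((pyTranslate o a 0).all fun p => decide (p.1 < bw)) = true ↔ a < bw - mx := by
    intro a
    simp only [pyTranslate, List.all_map, List.all_eq_true, Function.comp, decide_eq_true_eq]
    constructor
    · intro h
      have := h qx hqx
      omega
    · intro h p hp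
      have := hmaxx p hp
      omega
  have hfity : ∀ dx a : Int, ((pyTranslate o dx a).all fun p => decide (p.2 < bh)) = true ↔ a < bh - my := by
    intro dx a
    simp only [pyTranslate, List.all_map, List.all_eq_true, Function.comp, decide_eq_true_eq]
    constructor
    · intro h
      have := h qy hqy
      omega
    · intro h p hp
      have := hmaxy p hp
      omega
  by_cases hguard : (o.all fun p => decide (p.2 < bh)) = true
  case neg =>
    rw [if_neg hguard]
    have hbh : bh - my ≤ 0 := by
      simp only [List.all_eq_true, decide_eq_true_eq] at hguard
      push_neg at hguard
      obtain ⟨p, hp, hple⟩ := hguard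
      have := hmaxy p hp
      omega
    trans ((PySem.List.pyRange 0 (bw - mx) 1).foldl
      (fun (pl : PySem.Dict (List (Int × Int)) Int) (_ : Int) => pl) pl)
    · apply PySem.List.foldl_congr_mem
      intro pl' dx _
      rw [PySem.List.pyRange_one_eq_nil (by omega : bh - my ≤ 0), List.foldl_nil]
    · rw [PySem.List.foldl_ignore]
  rw [if_pos hguard]
  have hcols : pvCols bw bw.toNat [] o
      = (PySem.List.pyRange 0 (bw - mx) 1).map (fun dx => pyTranslate o dx 0) := by
    have := pvCols_eq bw mx o hfitx bw.toNat 0 (by omega) []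
    rwa [pyTranslate_zero, List.nil_append] at this
  rw [hcols, List.foldl_map]
  apply PySem.List.foldl_congr_mem
  intro pl' dx _
  exact (pvClimb_eq bh idx my dx o (hfity dx) bh.toNat 0 (by omega) pl').symm
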